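-- pv_equiv track=rewrite | github.com/letmeentertainyou/Chartifier | algorithm_changes/v0.3.7/python/rhythm.0.3.7.b.py | rhythm_permutations
-- ===== SOURCE A (Python) =====
-- def rhythm_permutations(start=[2, 3, 4], size=8):
--     '''
--     This can calculate size=20 in 0m0.103s where as heap_perm would take hours to calculate size=18
--
--     The premise is that I want every permutation before a certain length
--     Including duplicate digits. The way to achieve duplicate digits with permutations
--     requires input that looks like this [2, 2, 2, 2, 3, 3, 4, 4] and it can only have
--     as many copies of any digit as are in your input, and the max length is huge.
--
--     This is a huge waste because we have to count all the permutations for length of the input.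
--     Where as I only care about the length where the sum of all twos is less than or equal
--     to the size. By only using each digit once we have dramatically reduced the amount of work
--     the computer does by two different factors. Both the max length of the
--     input can be much smaller and the length of desired output is much smaller.
--     Also we are calculating all the different length perms in one go, instead of x different
--     times. I took O(N! * M) down to basically O(Nᴹ)
--     '''
--
--     upper = size // 2
--
--     old    = [[dig] for dig in start]       # It's weird that I need this
--     digits = [[dig] for dig in start]       # data twice but I genuinely do
--
--     for _ in range(1, upper):
--         tmp = []
--         for digit in start:
--             for tail in old:
--                 slice = [digit] + tail
--                 sum_slice = sum(slice)
--
--                 if sum_slice <= size: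
--                     tmp.append(slice)
--
--         old = tmp
--         digits += old
--     return digits
-- ===== SOURCE B (Python) =====
-- def rhythm_permutations(start=[2, 3, 4], size=8):
--     # Recursive level generator; frontier carries (sum, sequence) pairs so
--     # sums are extended incrementally instead of recomputed with sum().
--     def levels(frontier, n):
--         if n <= 0:
--             return []
--         nxt = [(s + d, [d] + seq) for d in start for (s, seq) in frontier if s + d <= size]
--         return [seq for _, seq in nxt] + levels(nxt, n - 1)
--
--     return [[d] for d in start] + levels([(d, [d]) for d in start], size // 2 - 1)
-- ===== Notes on version B (the rewrite author's own statement) =====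
-- stated objective: alternative
-- what changed: Replaces the imperative frontier loop (which re-sums every candidate with sum()) by a recursive level generator whose frontier carries (running-sum, sequence) pairs built with comprehensions, so the inner sum() scan disappears and the output is assembled by concatenating levels instead of mutating an accumulator.
import Mathlib
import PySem

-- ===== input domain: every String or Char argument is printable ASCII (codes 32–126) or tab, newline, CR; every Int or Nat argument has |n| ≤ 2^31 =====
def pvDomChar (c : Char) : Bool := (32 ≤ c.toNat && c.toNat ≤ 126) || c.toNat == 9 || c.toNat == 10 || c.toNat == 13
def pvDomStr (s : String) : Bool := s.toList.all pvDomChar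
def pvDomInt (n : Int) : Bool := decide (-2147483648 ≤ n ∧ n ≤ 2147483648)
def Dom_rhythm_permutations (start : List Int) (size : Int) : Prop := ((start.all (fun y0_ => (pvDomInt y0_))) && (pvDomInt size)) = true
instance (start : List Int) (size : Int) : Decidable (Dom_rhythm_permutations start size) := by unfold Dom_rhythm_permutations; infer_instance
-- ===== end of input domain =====

-- ===== PORT A =====
-- B replaces A's imperative pruned-frontier loop by a recursive level generator over
-- (running-sum, sequence) pairs; return values proved equal on the whole domain.
def rhythm_permutations (start : List Int) (size : Int) : List (List Int) :=
  let upper := PySem.Int.floordiv size 2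
  let old := start.map (fun dig => [dig])
  let digits := start.map (fun dig => [dig])
  let res := (PySem.List.pyRange 1 upper 1).foldl
    (fun (st : List (List Int) × List (List Int)) _ =>
      let tmp := start.foldl (fun tmp digit =>
        st.1.foldl (fun tmp tail =>
          let slice := digit :: tail
          let sum_slice := slice.sum
          if sum_slice ≤ size then tmp ++ [slice] else tmp) tmp) []
      (tmp, st.2 ++ tmp)) (old, digits)
  res.2

-- ===== PORT B =====
-- recursion counter n <= 0 is ported as Nat fuel (n.toNat): python's n only ever decrements to 0
def rpLevels (start : List Int) (size : Int) : List (Int × List Int) → Nat → List (List Int)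
  | _, 0 => []
  | frontier, Nat.succ m =>
    let nxt := start.flatMap (fun d =>
      (frontier.filter (fun p => p.1 + d ≤ size)).map (fun p => (p.1 + d, d :: p.2)))
    nxt.map (·.2) ++ rpLevels start size nxt m

def rhythm_permutations_alt (start : List Int) (size : Int) : List (List Int) :=
  start.map (fun d => [d]) ++
    rpLevels start size (start.map (fun d => (d, [d]))) (PySem.Int.floordiv size 2 - 1).toNat

-- ===== PRECONDITION & SPEC =====
def Spec_rhythm_permutations (start : List Int) (size : Int) (out : List (List Int)) : Prop := out = rhythm_permutations_alt start size
instance (start : List Int) (size : Int) (out : List (List Int)) : Decidable (Spec_rhythm_permutations start size out) := by unfold Spec_rhythm_permutations; infer_instance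

-- ===== CLAIM (what is proved, stated in full; the proofs are below) =====
def Claim_equal_rhythm_permutations : Prop := ∀ (start : List Int) (size : Int), Dom_rhythm_permutations start size → Spec_rhythm_permutations start size (rhythm_permutations start size)

-- ===== LEMMAS AND PROOFS =====

-- the filtered flatMap computed by A's inner double loop
def stepA (start : List Int) (size : Int) (old : List (List Int)) : List (List Int) :=
  start.flatMap (fun d => (old.filter (fun t => (d :: t).sum ≤ size)).map (fun t => d :: t))

theorem foldl_append_ite {α β : Type} (p : α → Prop) [DecidablePred p] (f : α → β)
    (l : List α) (acc : List β) :
    l.foldl (fun acc x => if p x then acc ++ [f x] else acc) acc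
      = acc ++ (l.filter (fun x => decide (p x))).map f := by
  induction l generalizing acc with
  | nil => simp
  | cons x xs ih =>
    simp only [List.foldl_cons, List.filter_cons]
    by_cases h : p x
    · simp [h, ih, List.append_assoc]
    · simp [h, ih]

theorem foldl_append_flatMap {α β : Type} (g : α → List β) (l : List α) (acc : List β) :
    l.foldl (fun acc x => acc ++ g x) acc = acc ++ l.flatMap g := by
  induction l generalizing acc with
  | nil => simp
  | cons x xs ih => simp [List.foldl_cons, ih, List.append_assoc]

theorem stepA_eq (start : List Int) (size : Int) (old : List (List Int)) :
    start.foldl (fun tmp digit =>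
        old.foldl (fun tmp tail =>
          let slice := digit :: tail
          let sum_slice := slice.sum
          if sum_slice ≤ size then tmp ++ [slice] else tmp) tmp) []
      = stepA start size old := by
  have h : (fun tmp digit =>
        old.foldl (fun tmp tail =>
          let slice := digit :: tail
          let sum_slice := slice.sum
          if sum_slice ≤ size then tmp ++ [slice] else tmp) tmp)
      = (fun (tmp : List (List Int)) (digit : Int) =>
          tmp ++ (old.filter (fun t => decide ((digit :: t).sum ≤ size))).map
            (fun t => digit :: t)) := by
    funext tmp digit
    exact foldl_append_ite (fun t => (digit :: t).sum ≤ size) (fun t => digit :: t) old tmp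
  rw [h, foldl_append_flatMap]
  simp [stepA]

-- iterate A's loop body m times (the foldl over pyRange ignores the range element)
def iterA (start : List Int) (size : Int) :
    Nat → (List (List Int) × List (List Int)) → (List (List Int) × List (List Int))
  | 0, st => st
  | Nat.succ m, st => iterA start size m (stepA start size st.1, st.2 ++ stepA start size st.1)

theorem foldl_const_iter (start : List Int) (size : Int) (l : List Int)
    (st : List (List Int) × List (List Int)) :
    l.foldl (fun st _ => (stepA start size st.1, st.2 ++ stepA start size st.1)) st
      = iterA start size l.length st := by
  induction l generalizing st with
  | nil => rfl
  | cons x xs ih => simp [List.foldl_cons, iterA, ih]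

theorem stepB_map (start : List Int) (size : Int) (old : List (List Int)) :
    start.flatMap (fun d =>
        ((old.map (fun t => (t.sum, t))).filter (fun p => p.1 + d ≤ size)).map
          (fun p => (p.1 + d, d :: p.2)))
      = (stepA start size old).map (fun t => (t.sum, t)) := by
  simp only [stepA, List.map_flatMap]
  refine List.flatMap_congr ?_
  intro d _
  rw [List.filter_map, List.map_map, List.map_map]
  rw [List.filter_congr (fun t _ => by
    show decide ((t.sum, t).1 + d ≤ size) = decide ((d :: t).sum ≤ size)
    simp [List.sum_cons, Int.add_comm])]
  apply List.map_congr_left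
  intro t _
  simp [Function.comp, List.sum_cons, Int.add_comm]

theorem iterA_snd (start : List Int) (size : Int) (m : Nat)
    (old digits : List (List Int)) :
    (iterA start size m (old, digits)).2
      = digits ++ rpLevels start size (old.map (fun t => (t.sum, t))) m := by
  induction m generalizing old digits with
  | zero => simp [iterA, rpLevels]
  | succ k ih =>
    rw [iterA, rpLevels]
    show (iterA start size k (stepA start size old, digits ++ stepA start size old)).2 = _
    rw [ih, stepB_map, List.map_map,
      show ((fun x : Int × List Int => x.2) ∘ fun t : List Int => (t.sum, t)) = id from rfl,
      List.map_id, List.append_assoc]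

-- ===== VERDICT (by name: the statement is the Claim_ definition above) =====
theorem rhythm_permutations_spec : Claim_equal_rhythm_permutations := by
  intro start size _
  show rhythm_permutations start size = rhythm_permutations_alt start size
  unfold rhythm_permutations rhythm_permutations_alt
  have hfun : (fun (st : List (List Int) × List (List Int)) (_ : Int) =>
      let tmp := start.foldl (fun tmp digit =>
        st.1.foldl (fun tmp tail =>
          let slice := digit :: tail
          let sum_slice := slice.sum
          if sum_slice ≤ size then tmp ++ [slice] else tmp) tmp) []
      (tmp, st.2 ++ tmp))
      = (fun (st : List (List Int) × List (List Int)) (_ : Int) =>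
          (stepA start size st.1, st.2 ++ stepA start size st.1)) := by
    funext st x
    simp only [stepA_eq]
  rw [hfun]
  dsimp only
  rw [foldl_const_iter, PySem.List.length_pyRange_one, iterA_snd]
  congr 1
  rw [List.map_map,
    show ((fun t : List Int => (t.sum, t)) ∘ fun dig : Int => [dig]) = (fun d : Int => (d, [d]))
      from funext fun d => by simp]
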